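-- pv_equiv track=rewrite | github.com/2jun0/Algorithm | codes/boj/python/21318번 피아노 체조.py | get_mistake_dp
-- ===== SOURCE A (Python) =====
-- def get_mistake_dp(Lv):
--   dp = [0]*len(Lv)
--   for i in range(1, len(Lv)):
--     if Lv[i-1] > Lv[i]:
--       dp[i] = dp[i-1] + 1
--     else:
--       dp[i] = dp[i-1]
--   return dp
-- ===== SOURCE B (Python) =====
-- from bisect import bisect_right
--
-- def get_mistake_dp(Lv):
--   # positions i (1-based gap index) where a descent Lv[i-1] > Lv[i] occurs, in increasing order
--   desc = [i for i in range(1, len(Lv)) if Lv[i-1] > Lv[i]]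
--   # dp[i] = number of descent positions <= i, found by binary search on the sorted positions
--   return [bisect_right(desc, i) for i in range(len(Lv))]
-- ===== Notes on version B (the rewrite author's own statement) =====
-- stated objective: alternative
-- what changed: Replaces A's fused carry-the-running-sum loop over a preallocated dp array with an offline-query algorithm: build the sorted list of descent positions once, then answer dp[i] as the number of positions <= i by binary search (bisect_right).
import Mathlib
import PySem

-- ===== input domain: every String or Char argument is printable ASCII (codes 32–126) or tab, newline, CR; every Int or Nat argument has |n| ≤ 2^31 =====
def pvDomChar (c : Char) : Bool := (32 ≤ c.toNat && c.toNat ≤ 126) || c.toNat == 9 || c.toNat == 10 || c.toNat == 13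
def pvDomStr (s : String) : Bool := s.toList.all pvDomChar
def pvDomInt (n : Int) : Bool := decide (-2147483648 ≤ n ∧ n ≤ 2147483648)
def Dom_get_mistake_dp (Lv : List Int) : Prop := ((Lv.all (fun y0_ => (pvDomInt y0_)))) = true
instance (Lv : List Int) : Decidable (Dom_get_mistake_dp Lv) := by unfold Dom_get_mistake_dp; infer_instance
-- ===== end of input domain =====

-- B replaces A's fused running-sum loop by an offline-query algorithm: build the sorted
-- list of descent positions once, then answer each dp[i] by binary search (bisect_right).

-- ===== PORT A =====
-- for i in range(1, len(Lv)): dp[i] = dp[i-1] + (1 if Lv[i-1] > Lv[i] else 0)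
-- (indices i and i-1 are always in range, so pyGetD/pySetD are exact here)
def get_mistake_dp (Lv : List Int) : List Int :=
  (PySem.List.pyRange 1 (Lv.length : Int) 1).foldl
    (fun dp i =>
      if PySem.List.pyGetD Lv (i - 1) 0 > PySem.List.pyGetD Lv i 0 then
        PySem.List.pySetD dp i (PySem.List.pyGetD dp (i - 1) 0 + 1)
      else
        PySem.List.pySetD dp i (PySem.List.pyGetD dp (i - 1) 0))
    (List.replicate Lv.length 0)

-- ===== PORT B =====
-- desc = [i for i in range(1, len(Lv)) if Lv[i-1] > Lv[i]]
def pvDesc (Lv : List Int) : List Int :=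
  (PySem.List.pyRange 1 (Lv.length : Int) 1).filter
    (fun i => decide (PySem.List.pyGetD Lv (i - 1) 0 > PySem.List.pyGetD Lv i 0))

-- [bisect_right(desc, i) for i in range(len(Lv))]  (bisect_right = PySem.List.bisectRight)
def get_mistake_dp_alt (Lv : List Int) : List Int :=
  (PySem.List.pyRange 0 (Lv.length : Int) 1).map
    (fun i => ((PySem.List.bisectRight (pvDesc Lv) i : Nat) : Int))

-- ===== PRECONDITION & SPEC =====
def Spec_get_mistake_dp (Lv : List Int) (out : List Int) : Prop := out = get_mistake_dp_alt Lv
instance (Lv : List Int) (out : List Int) : Decidable (Spec_get_mistake_dp Lv out) := by unfold Spec_get_mistake_dp; infer_instance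

-- ===== CLAIM =====
def Claim_equal_get_mistake_dp : Prop := ∀ (Lv : List Int), Dom_get_mistake_dp Lv → Spec_get_mistake_dp Lv (get_mistake_dp Lv)

-- ===== LEMMAS AND PROOFS =====

theorem pvDesc_sorted (Lv : List Int) : (pvDesc Lv).Pairwise (· ≤ ·) :=
  ((PySem.List.pairwise_lt_pyRange_one 1 (Lv.length : Int)).filter _).imp le_of_lt

theorem pvDesc_mem_pos (Lv : List Int) (p : Int) (hp : p ∈ pvDesc Lv) : 1 ≤ p ∧ p < Lv.length := by
  have := List.mem_of_mem_filter hp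
  exact (PySem.List.mem_pyRange_one.mp this)

-- countP from a prefix/suffix split of the predicate
theorem pvCountP_of_prefix (xs : List Int) (p : Int → Bool) (r : Nat) (hr : r ≤ xs.length)
    (h1 : ∀ (j : Nat) (hj : j < xs.length), j < r → p xs[j])
    (h2 : ∀ (j : Nat) (hj : j < xs.length), r ≤ j → ¬ p xs[j]) :
    xs.countP p = r := by
  have hsplit : xs = xs.take r ++ xs.drop r := (List.take_append_drop r xs).symm
  rw [hsplit, List.countP_append]
  have ht : (xs.take r).countP p = (xs.take r).length := by
    rw [List.countP_eq_length]
    intro a ha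
    obtain ⟨j, hj, hja⟩ := List.mem_iff_getElem.mp ha
    have hjm : j < min r xs.length := by simpa using hj
    rw [List.getElem_take] at hja
    exact hja ▸ h1 j (by omega) (by omega)
  have hd : (xs.drop r).countP p = 0 := by
    rw [List.countP_eq_zero]
    intro a ha
    obtain ⟨j, hj, hja⟩ := List.mem_iff_getElem.mp ha
    have hjx : r + j < xs.length := by
      have hd := hj
      simp only [List.length_drop] at hd
      omega
    rw [List.getElem_drop] at hja
    exact hja ▸ h2 (r + j) hjx (by omega)
  rw [ht, hd, List.length_take]
  omega

theorem pvBisect_eq_countP (xs : List Int) (x : Int) (hs : xs.Pairwise (· ≤ ·)) :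
    PySem.List.bisectRight xs x = xs.countP (fun p => decide (p ≤ x)) := by
  obtain ⟨h0, h1, h2⟩ := PySem.List.bisectRight_spec xs x hs
  exact (pvCountP_of_prefix xs _ _ h0
    (fun j hj hjr => by simpa using h1 j hj hjr)
    (fun j hj hjr => by simpa using not_le.mpr (h2 j hj hjr))).symm

-- stepping the threshold by one adds the multiplicity of x+1
theorem pvCountP_le_succ (l : List Int) (x : Int) :
    l.countP (fun p => decide (p ≤ x + 1)) = l.countP (fun p => decide (p ≤ x)) + l.count (x + 1) := by
  induction l with
  | nil => simp
  | cons a l ih =>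
    simp only [List.countP_cons, List.count_cons, ih]
    split_ifs with h1 h2 h3 h2 h3 h3 <;> simp_all <;> omega

theorem pvAlt_length (Lv : List Int) : (get_mistake_dp_alt Lv).length = Lv.length := by
  simp [get_mistake_dp_alt, PySem.List.length_pyRange_one]

theorem pvAlt_getElem (Lv : List Int) (j : Nat) (h : j < (get_mistake_dp_alt Lv).length) :
    (get_mistake_dp_alt Lv)[j]
      = (((pvDesc Lv).countP (fun p => decide (p ≤ (j : Int))) : Nat) : Int) := by
  have hj : j < (PySem.List.pyRange 0 (Lv.length : Int) 1).length := by
    simpa [get_mistake_dp_alt] using h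
  simp only [get_mistake_dp_alt, List.getElem_map, PySem.List.getElem_pyRange_one, zero_add,
    pvBisect_eq_countP _ _ (pvDesc_sorted Lv)]

theorem pvAlt_zero (Lv : List Int) (h : 0 < (get_mistake_dp_alt Lv).length) :
    (get_mistake_dp_alt Lv)[0] = 0 := by
  have h0 : (pvDesc Lv).countP (fun p => decide (p ≤ ((0 : Nat) : Int))) = 0 := by
    rw [List.countP_eq_zero]
    intro a ha
    have h1 := (pvDesc_mem_pos Lv a ha).1
    simp only [decide_eq_true_eq, not_le]
    omega
  rw [pvAlt_getElem Lv 0 h, h0]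
  rfl

theorem pvAlt_succ (Lv : List Int) (j : Nat) (h : j + 1 < Lv.length) :
    (get_mistake_dp_alt Lv)[j+1]'(by rw [pvAlt_length]; omega)
      = (get_mistake_dp_alt Lv)[j]'(by rw [pvAlt_length]; omega)
        + (if Lv[j] > Lv[j+1] then (1 : Int) else 0) := by
  rw [pvAlt_getElem Lv (j+1) (by rw [pvAlt_length]; omega),
      pvAlt_getElem Lv j (by rw [pvAlt_length]; omega)]
  have hstep : ((j + 1 : Nat) : Int) = ((j : Nat) : Int) + 1 := by push_cast; ring
  rw [hstep, pvCountP_le_succ]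
  have hcount : (pvDesc Lv).count (((j : Nat) : Int) + 1)
      = if Lv[j] > Lv[j+1] then 1 else 0 := by
    have hmem : (((j : Nat) : Int) + 1) ∈ PySem.List.pyRange 1 (Lv.length : Int) 1 := by
      rw [PySem.List.mem_pyRange_one]
      constructor <;> [omega; (push_cast; omega)]
    have hone : (PySem.List.pyRange 1 (Lv.length : Int) 1).count (((j : Nat) : Int) + 1) = 1 :=
      List.count_eq_one_of_mem (PySem.List.nodup_pyRange_one 1 (Lv.length : Int)) hmem
    have hg1 : PySem.List.pyGetD Lv (((j : Nat) : Int) + 1 - 1) 0 = Lv[j] := by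
      rw [show ((j : Nat) : Int) + 1 - 1 = ((j : Nat) : Int) by ring, PySem.List.pyGetD_natCast]
      exact List.getD_eq_getElem _ _ (by omega)
    have hg2 : PySem.List.pyGetD Lv (((j : Nat) : Int) + 1) 0 = Lv[j+1] := by
      rw [show ((j : Nat) : Int) + 1 = ((j + 1 : Nat) : Int) by push_cast; ring, PySem.List.pyGetD_natCast]
      exact List.getD_eq_getElem _ _ (by omega)
    by_cases hc : Lv[j] > Lv[j+1]
    · rw [if_pos hc]
      unfold pvDesc
      rw [List.count_filter (by simp only [hg1, hg2, decide_eq_true_eq]; exact hc)]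
      exact hone
    · rw [if_neg hc]
      apply List.count_eq_zero_of_not_mem
      intro hmf
      have hp := (List.mem_filter.mp hmf).2
      rw [hg1, hg2] at hp
      simp only [decide_eq_true_eq] at hp
      exact hc hp
  rw [hcount]
  split_ifs with hc <;> push_cast <;> ring

theorem pvSet_append (l₁ l₂ : List Int) (v x : Int) :
    (l₁ ++ x :: l₂).set l₁.length v = l₁ ++ v :: l₂ := by
  induction l₁ with
  | nil => rfl
  | cons a l ih => simp [ih]

-- loop invariant: after processing range(1, k), the array is B's answer on [0,k) and 0 beyond
theorem pvLoop_inv (Lv : List Int) (k : Nat) (h1 : 1 ≤ k) (h2 : k ≤ Lv.length) :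
    (PySem.List.pyRange 1 (k : Int) 1).foldl
      (fun dp i =>
        if PySem.List.pyGetD Lv (i - 1) 0 > PySem.List.pyGetD Lv i 0 then
          PySem.List.pySetD dp i (PySem.List.pyGetD dp (i - 1) 0 + 1)
        else
          PySem.List.pySetD dp i (PySem.List.pyGetD dp (i - 1) 0))
      (List.replicate Lv.length 0)
    = (get_mistake_dp_alt Lv).take k ++ List.replicate (Lv.length - k) 0 := by
  induction k, h1 using Nat.le_induction with
  | base =>
    rw [PySem.List.pyRange_one_eq_nil (by norm_num)]
    have hlen : 0 < (get_mistake_dp_alt Lv).length := by rw [pvAlt_length]; omega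
    have htake : (get_mistake_dp_alt Lv).take 1 = [(get_mistake_dp_alt Lv)[0]] := by
      rw [List.take_one, List.head?_eq_getElem?, List.getElem?_eq_getElem hlen]
      rfl
    obtain ⟨m, hm⟩ : ∃ m, Lv.length = m + 1 := ⟨Lv.length - 1, by omega⟩
    rw [List.foldl_nil, htake, pvAlt_zero Lv hlen, hm]
    simp [List.replicate_succ]
  | succ k hk ih =>
    obtain ⟨j, rfl⟩ : ∃ j, k = j + 1 := ⟨k - 1, by omega⟩
    have hkn : j + 1 ≤ Lv.length := by omega
    have hck : (get_mistake_dp_alt Lv).length = Lv.length := pvAlt_length Lv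
    rw [show ((j + 1 + 1 : Nat) : Int) = ((j + 1 : Nat) : Int) + 1 by push_cast; ring,
        PySem.List.pyRange_one_succ_right (by exact_mod_cast hk),
        List.foldl_append, ih hkn]
    simp only [List.foldl_cons, List.foldl_nil]
    rw [show ((j + 1 : Nat) : Int) - 1 = ((j : Nat) : Int) by push_cast; ring]
    simp only [PySem.List.pyGetD_natCast, PySem.List.pySetD_natCast]
    have hlen_take : ((get_mistake_dp_alt Lv).take (j + 1)).length = j + 1 := by
      rw [List.length_take]; omega
    have hread : ((get_mistake_dp_alt Lv).take (j + 1) ++ List.replicate (Lv.length - (j + 1)) 0).getD j 0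
        = (get_mistake_dp_alt Lv)[j]'(by omega) := by
      rw [List.getD_append _ _ _ _ (by omega),
          List.getD_eq_getElem _ _ (by omega), List.getElem_take]
    have hLv1 : Lv.getD j 0 = Lv[j]'(by omega) := List.getD_eq_getElem _ _ (by omega)
    have hLv2 : Lv.getD (j + 1) 0 = Lv[j + 1]'(by omega) := List.getD_eq_getElem _ _ (by omega)
    obtain ⟨m, hm⟩ : ∃ m, Lv.length - (j + 1) = m + 1 := ⟨Lv.length - (j + 1) - 1, by omega⟩
    have hset : ∀ v : Int,
        ((get_mistake_dp_alt Lv).take (j + 1) ++ List.replicate (Lv.length - (j + 1)) 0).set (j + 1) v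
        = (get_mistake_dp_alt Lv).take (j + 1) ++ v :: List.replicate m 0 := by
      intro v
      rw [hm, List.replicate_succ]
      have hs := pvSet_append ((get_mistake_dp_alt Lv).take (j + 1)) (List.replicate m 0) v 0
      rw [hlen_take] at hs
      exact hs
    have htake : (get_mistake_dp_alt Lv).take (j + 1 + 1)
        = (get_mistake_dp_alt Lv).take (j + 1) ++ [(get_mistake_dp_alt Lv)[j + 1]'(by omega)] := by
      rw [List.take_add_one, List.getElem?_eq_getElem (by omega)]
      rfl
    have hrec := pvAlt_succ Lv j (by omega)
    rw [hread, hLv1, hLv2, htake, show Lv.length - (j + 1 + 1) = m from by omega]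
    split_ifs with hcond
    · rw [hset]
      simp [hrec, hcond]
    · rw [hset]
      simp [hrec, hcond]

-- ===== VERDICT =====
theorem get_mistake_dp_spec : Claim_equal_get_mistake_dp := by
  intro Lv _
  unfold Spec_get_mistake_dp
  by_cases he : Lv = []
  · subst he; rfl
  · have hn : 1 ≤ Lv.length := by
      cases Lv with
      | nil => exact absurd rfl he
      | cons x xs => simp
    have := pvLoop_inv Lv Lv.length hn le_rfl
    unfold get_mistake_dp
    rw [this, Nat.sub_self, List.replicate_zero, List.append_nil,
        List.take_of_length_le (le_of_eq (pvAlt_length Lv))]
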